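-- pv_equiv track=rewrite | github.com/jo-yrabbit/sandbox-bot | parser.py | _is_question
-- ===== SOURCE A (Python) =====
-- TARGET = 'would you like'
--
-- def _is_question(message) -> int:
--     """Returns line number where question found, -1 otherwise"""
--     line_num = -1
--
--     if TARGET not in message.lower():
--         return line_num
--
--     # Get last instance of target
--     lines = message.lower().split('\n')
--     for i, line in enumerate(lines):
--         if TARGET in line:
--             line_num = i
--
--     return line_num
-- ===== SOURCE B (Python) =====
-- TARGET = 'would you like'
--
-- def _is_question(message) -> int:
--     """Returns line number where question found, -1 otherwise"""
--     lines = message.lower().split('\n')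
--     for i in range(len(lines) - 1, -1, -1):
--         if TARGET in lines[i]:
--             return i
--     return -1
-- ===== Notes on version B (the rewrite author's own statement) =====
-- stated objective: simpler
-- what changed: Instead of a containment pre-check plus a full forward enumerate that keeps overwriting the last match, B scans the split lines backwards and returns the first match it meets (early exit), with no pre-check.
import Mathlib
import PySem

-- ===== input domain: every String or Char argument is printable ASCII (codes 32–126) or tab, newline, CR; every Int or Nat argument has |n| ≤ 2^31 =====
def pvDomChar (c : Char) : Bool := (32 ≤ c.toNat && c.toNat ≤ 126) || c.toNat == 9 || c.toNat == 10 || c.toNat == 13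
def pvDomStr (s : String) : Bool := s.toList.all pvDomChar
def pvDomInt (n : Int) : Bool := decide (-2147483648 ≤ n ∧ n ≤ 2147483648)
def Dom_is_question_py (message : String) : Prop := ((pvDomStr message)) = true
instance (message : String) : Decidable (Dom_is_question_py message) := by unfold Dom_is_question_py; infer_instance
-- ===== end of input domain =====

-- B replaces A's containment pre-check plus full forward enumerate (overwriting the last match)
-- by a single backward scan over the split lines that returns the first match it meets; same values, similar cost.

-- the module constant TARGET = 'would you like'
def pvTarget : List Char := "would you like".toList

-- ===== PORT A =====
def is_question_py (message : String) : Int :=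
  -- line_num = -1; if TARGET not in message.lower(): return line_num
  if PySem.Chars.isIn pvTarget (PySem.Chars.lower message.toList) = false then -1
  else
    -- lines = message.lower().split('\n'); for i, line in enumerate(lines): if TARGET in line: line_num = i
    let lines := PySem.Chars.splitOn (PySem.Chars.lower message.toList) ['\n']
    (PySem.List.enumerate lines).foldl
      (fun line_num p => if PySem.Chars.isIn pvTarget p.2 then p.1 else line_num) (-1)

-- ===== PORT B =====
-- for i in range(len(lines) - 1, -1, -1): if TARGET in lines[i]: return i     (fuel n = i + 1)
def isqRevScan (lines : List (List Char)) : Nat → Int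
  | 0 => -1
  | n + 1 => if PySem.Chars.isIn pvTarget (lines.getD n []) then (n : Int) else isqRevScan lines n

def is_question_py_alt (message : String) : Int :=
  let lines := PySem.Chars.splitOn (PySem.Chars.lower message.toList) ['\n']
  isqRevScan lines lines.length

-- ===== PRECONDITION & SPEC =====
def Spec_is_question_py (message : String) (out : Int) : Prop := out = is_question_py_alt message
instance (message : String) (out : Int) : Decidable (Spec_is_question_py message out) := by unfold Spec_is_question_py; infer_instance

-- ===== CLAIM (what is proved, stated in full; the proofs are below) =====
def Claim_equal_is_question_py : Prop := ∀ (message : String), Dom_is_question_py message → Spec_is_question_py message (is_question_py message)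

-- ===== LEMMAS AND PROOFS =====

-- every piece produced by splitOn.go is in acc or an infix of cur.reverse ++ l
lemma splitOn_go_mem_infix (sep : List Char) (fuel : Nat) :
    ∀ (l cur : List Char) (acc : List (List Char)) (piece : List Char),
      piece ∈ PySem.Chars.splitOn.go sep fuel l cur acc →
        piece ∈ acc ∨ piece <:+: (cur.reverse ++ l) := by
  induction fuel with
  | zero =>
    intro l cur acc piece h
    simp [PySem.Chars.splitOn.go] at h
    rcases h with h | h
    · left; exact h
    · right; exact h ▸ List.infix_rfl
  | succ n ih =>
    intro l cur acc piece h
    cases l with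
    | nil =>
      simp [PySem.Chars.splitOn.go] at h
      rcases h with h | h
      · left; exact h
      · right; subst h; simp
    | cons c rest =>
      rw [PySem.Chars.splitOn.go] at h
      split at h
      · rcases ih _ _ _ _ h with hmem | hinf
        · rcases List.mem_cons.mp hmem with h' | h'
          · right; exact h' ▸ (List.infix_rfl.trans (List.prefix_append _ _).isInfix)
          · left; exact h'
        · right
          refine hinf.trans ?_
          simpa using (List.drop_suffix _ (c :: rest)).isInfix.trans (List.suffix_append _ _).isInfix
      · rcases ih _ _ _ _ h with hmem | hinf
        · left; exact hmem
        · right; simpa using hinf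

lemma mem_splitOn_infix (s sep piece : List Char) (h : piece ∈ PySem.Chars.splitOn s sep) :
    piece <:+: s := by
  rcases splitOn_go_mem_infix sep (s.length + 1) s [] [] piece h with h' | h'
  · simp at h'
  · simpa using h'

-- the backward scan only looks at indices below its fuel
lemma isqRevScan_append (L : List (List Char)) (x : List Char) :
    ∀ n, n ≤ L.length → isqRevScan (L ++ [x]) n = isqRevScan L n := by
  intro n
  induction n with
  | zero => intro _; rfl
  | succ m ih =>
    intro hle
    have hm : m < L.length := by omega
    simp only [isqRevScan, List.getD_eq_getElem?_getD, List.getElem?_append_left hm,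
      ih (by omega)]

-- backward first-match scan = forward fold keeping the last match
lemma isqRevScan_eq_foldl (L : List (List Char)) :
    isqRevScan L L.length =
      (PySem.List.enumerate L).foldl
        (fun line_num p => if PySem.Chars.isIn pvTarget p.2 then p.1 else line_num) (-1) := by
  induction L using List.reverseRecOn with
  | nil => simp [isqRevScan, PySem.List.enumerate_nil]
  | append_singleton L x ih =>
    have hgetD : (L ++ [x]).getD L.length [] = x := by
      simp [List.getD_eq_getElem?_getD]
    have hlen : (L ++ [x]).length = L.length + 1 := by simp
    rw [hlen, isqRevScan, hgetD, isqRevScan_append L x L.length (le_refl _), ih,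
      PySem.List.enumerate_append, List.foldl_append]
    simp [PySem.List.enumerate_cons, PySem.List.enumerate_nil]

-- when no line matches, the backward scan returns -1
lemma isqRevScan_of_no_match (L : List (List Char))
    (h : ∀ line ∈ L, PySem.Chars.isIn pvTarget line = false) :
    ∀ n, n ≤ L.length → isqRevScan L n = -1 := by
  intro n
  induction n with
  | zero => intro _; rfl
  | succ m ih =>
    intro hle
    have hm : m < L.length := by omega
    have hmem : L.getD m [] ∈ L := by
      rw [List.getD_eq_getElem L _ hm]; exact List.getElem_mem hm
    simp only [isqRevScan, h _ hmem, Bool.false_eq_true, if_false]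
    exact ih (by omega)

-- ===== VERDICT (by name: the statement is the Claim_ definition above) =====
theorem is_question_py_spec : Claim_equal_is_question_py := by
  intro message _
  unfold Spec_is_question_py is_question_py is_question_py_alt
  by_cases hg : PySem.Chars.isIn pvTarget (PySem.Chars.lower message.toList) = false
  · simp only [hg, if_true]
    refine (isqRevScan_of_no_match _ ?_ _ (le_refl _)).symm
    intro line hline
    by_contra hb
    have hlt : pvTarget <:+: line :=
      (PySem.Chars.isIn_iff_infix _ _).mp (by revert hb; cases PySem.Chars.isIn pvTarget line <;> simp)
    have : pvTarget <:+: PySem.Chars.lower message.toList :=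
      hlt.trans (mem_splitOn_infix _ _ _ hline)
    rw [PySem.Chars.isIn_eq_false_iff] at hg
    exact hg this
  · simp only [hg]
    exact (isqRevScan_eq_foldl _).symm
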